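-- pv_equiv track=rewrite | github.com/ASSERT-KTH/Mokav | experiments/pynguin/c4b/return-lst/generated_tests/src_1697/4/src_1697.py | func
-- ===== SOURCE A (Python) =====
-- def func(*args):
-- 	ret_values = []
--
-- 	from bisect import bisect_left
-- 	arr = [(((((2 * i) + 1) ** 2) // 2) + 1) for i in range(7)]
-- 	n = int(args[0])
-- 	if (n == 3):
-- 	    ret_values.append(5)
-- 	else:
-- 	    ret_values.append(((2 * bisect_left(arr, n)) + 1))
--
-- 	return ret_values
-- ===== SOURCE B (Python) =====
-- import math
--
-- def func(*args):
--     n = int(args[0])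
--     if n == 3:
--         return [5]
--     s = 2 * n - 3
--     if s < 1:
--         return [1]
--     root = math.isqrt(s)
--     if root % 2 == 0:
--         root -= 1
--     index = min((root - 1) // 2 + 1, 7)
--     return [2 * index + 1]
-- ===== Notes on version B (the rewrite author's own statement) =====
-- stated objective: alternative
-- what changed: Replaces A's constant table plus bisect_left with a closed-form index computed directly from math.isqrt of 2n-3 (odd-adjusted integer root, index clamped at the table length).
import Mathlib
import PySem

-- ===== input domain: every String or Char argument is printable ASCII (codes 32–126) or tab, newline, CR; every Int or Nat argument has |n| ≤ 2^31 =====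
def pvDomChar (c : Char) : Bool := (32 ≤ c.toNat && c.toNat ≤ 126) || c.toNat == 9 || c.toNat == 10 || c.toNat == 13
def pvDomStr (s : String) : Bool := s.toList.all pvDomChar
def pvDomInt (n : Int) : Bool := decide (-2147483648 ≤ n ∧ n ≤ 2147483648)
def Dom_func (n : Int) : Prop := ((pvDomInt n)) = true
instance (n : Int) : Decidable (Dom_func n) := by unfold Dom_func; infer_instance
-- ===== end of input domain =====

-- B replaces A's constant table + bisect_left by a closed-form index from math.isqrt (alternative decomposition; not claimed faster).

-- ===== PORT A =====
-- bisect.bisect_left on a sorted list: number of leading elements < n (ported by contract of the stdlib call)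
def bisectLeft : List Int → Int → Int
  | [], _ => 0
  | x :: xs, n => if x < n then 1 + bisectLeft xs n else 0

def func (n : Int) : List Int :=
  let arr : List Int :=
    (PySem.List.pyRange 0 7 1).map (fun i => PySem.Int.floordiv ((2 * i + 1) ^ 2) 2 + 1)
  if n = 3 then [5]
  else [2 * bisectLeft arr n + 1]

-- ===== PORT B =====
def func_alt (n : Int) : List Int :=
  if n = 3 then [5]
  else
    let s := 2 * n - 3
    if s < 1 then [1]
    else
      let root : Int := (Nat.sqrt s.toNat : Int)   -- math.isqrt, exact: s ≥ 1 here
      let root := if root % 2 = 0 then root - 1 else root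
      let index := min (PySem.Int.floordiv (root - 1) 2 + 1) 7
      [2 * index + 1]

-- ===== PRECONDITION & SPEC =====
def Spec_func (n : Int) (out : List Int) : Prop := out = func_alt n
instance (n : Int) (out : List Int) : Decidable (Spec_func n out) := by unfold Spec_func; infer_instance

-- ===== CLAIM (what is proved, stated in full; the proofs are below) =====
def Claim_equal_func : Prop := ∀ (n : Int), Dom_func n → Spec_func n (func n)

-- ===== LEMMAS AND PROOFS =====

lemma arr_eq :
    (PySem.List.pyRange 0 7 1).map (fun i => PySem.Int.floordiv ((2 * i + 1) ^ 2) 2 + 1)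
      = [1, 5, 13, 25, 41, 61, 85] := by decide

lemma sqrt_two_cases (s a : Nat) (h1 : a * a ≤ s) (h2 : s < (a + 2) * (a + 2)) :
    Nat.sqrt s = a ∨ Nat.sqrt s = a + 1 := by
  have l1 : a ≤ Nat.sqrt s := Nat.le_sqrt'.mpr (by nlinarith)
  have l2 : Nat.sqrt s < a + 2 := Nat.sqrt_lt'.mpr (by nlinarith)
  omega

lemma fd2 (a : Int) : PySem.Int.floordiv a 2 = a / 2 :=
  PySem.Int.floordiv_eq_ediv_of_pos (by norm_num)

-- B's value on a bounded interval: a odd, a*a ≤ 2n-3 < (a+2)^2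
lemma alt_mid (n : Int) (a : Nat) (hodd : a % 2 = 1) (hn3 : n ≠ 3)
    (h1 : (a : Int) * a ≤ 2 * n - 3) (h2 : 2 * n - 3 < ((a : Int) + 2) * ((a : Int) + 2)) :
    func_alt n = [2 * min (((a : Int) - 1) / 2 + 1) 7 + 1] := by
  have ha1 : (1 : Int) ≤ (a : Int) := by exact_mod_cast (by omega : 1 ≤ a)
  have hs1 : ¬ (2 * n - 3 < 1) := by nlinarith
  have hsnat : (2 * n - 3).toNat = (2 * n - 3).toNat := rfl
  have hcast : ((2 * n - 3).toNat : Int) = 2 * n - 3 := by omega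
  have hb1 : a * a ≤ (2 * n - 3).toNat := by
    have : ((a * a : Nat) : Int) ≤ ((2 * n - 3).toNat : Int) := by push_cast; omega
    exact_mod_cast this
  have hb2 : (2 * n - 3).toNat < (a + 2) * (a + 2) := by
    have : ((2 * n - 3).toNat : Int) < (((a + 2) * (a + 2) : Nat) : Int) := by push_cast; omega
    exact_mod_cast this
  rcases sqrt_two_cases _ a hb1 hb2 with hr | hr <;>
    simp only [func_alt, if_neg hn3, if_neg hs1, hr, fd2] <;>
    push_cast <;>
    · congr 1
      omega

lemma bisect7 (n : Int) :
    bisectLeft [1, 5, 13, 25, 41, 61, 85] n =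
      (if (1:Int) < n then 1 else 0) + (if (5:Int) < n then 1 else 0) +
      (if (13:Int) < n then 1 else 0) + (if (25:Int) < n then 1 else 0) +
      (if (41:Int) < n then 1 else 0) + (if (61:Int) < n then 1 else 0) +
      (if (85:Int) < n then 1 else 0) := by
  simp only [bisectLeft]
  split_ifs <;> omega

theorem func_spec : Claim_equal_func := by
  intro n _
  unfold Spec_func
  by_cases h3 : n = 3
  · simp [func, func_alt, h3]
  · have hA : func n = [2 * bisectLeft [1, 5, 13, 25, 41, 61, 85] n + 1] := by
      simp only [func, arr_eq, if_neg h3]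
    rw [hA, bisect7]
    by_cases c1 : n ≤ 1
    · have : func_alt n = [1] := by
        simp only [func_alt, if_neg h3, if_pos (show 2 * n - 3 < 1 by omega)]
      rw [this]; simp only [List.cons.injEq, and_true]; split_ifs <;> omega
    · -- n ≥ 2, pick the interval and its odd root a
      rcases (by omega : n ≤ 5 ∨ (5 < n ∧ n ≤ 13) ∨ (13 < n ∧ n ≤ 25) ∨ (25 < n ∧ n ≤ 41)
          ∨ (41 < n ∧ n ≤ 61) ∨ (61 < n ∧ n ≤ 85) ∨ 85 < n) with h | h | h | h | h | h | h
      · rw [alt_mid n 1 rfl h3 (by omega) (by omega)]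
        simp only [List.cons.injEq, and_true]; split_ifs <;> omega
      · rw [alt_mid n 3 rfl h3 (by omega) (by omega)]
        simp only [List.cons.injEq, and_true]; split_ifs <;> omega
      · rw [alt_mid n 5 rfl h3 (by omega) (by omega)]
        simp only [List.cons.injEq, and_true]; split_ifs <;> omega
      · rw [alt_mid n 7 rfl h3 (by omega) (by omega)]
        simp only [List.cons.injEq, and_true]; split_ifs <;> omega
      · rw [alt_mid n 9 rfl h3 (by omega) (by omega)]
        simp only [List.cons.injEq, and_true]; split_ifs <;> omega
      · rw [alt_mid n 11 rfl h3 (by omega) (by omega)]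
        simp only [List.cons.injEq, and_true]; split_ifs <;> omega
      · -- n ≥ 86: root ≥ 13, index clamps to 7
        have hs1 : ¬ (2 * n - 3 < 1) := by omega
        have hr : 13 ≤ Nat.sqrt (2 * n - 3).toNat := by
          apply Nat.le_sqrt'.mpr; omega
        have halt : func_alt n = [15] := by
          simp only [func_alt, if_neg h3, if_neg hs1, fd2]
          split_ifs with he <;>
          · simp only [List.cons.injEq, and_true]
            omega
        rw [halt]; simp only [List.cons.injEq, and_true]; split_ifs <;> omega
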